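-- pv_equiv track=rewrite | github.com/Santares/LeetCodeProblems | 1424. Diagonal Traverse II/1424.py | findDiagonalOrder0
-- ===== SOURCE A (Python) =====
-- from typing import List
--
-- def findDiagonalOrder0(nums: List[List[int]]) -> List[int]:
--     res = []
--     m = len(nums)
--     n = max(len(row) for row in nums)
--
--     for i in range(m):
--         x = i
--         y = 0
--         while x >= 0:
--             if y < len(nums[x]):
--                 res.append(nums[x][y])
--             x -= 1
--             y += 1
--
--     for i in range(1, n):
--         x = m - 1
--         y = i
--         while x >= 0:
--             if y < len(nums[x]):
--                 res.append(nums[x][y])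
--             x -= 1
--             y += 1
--
--     return res
-- ===== SOURCE B (Python) =====
-- from typing import List
--
-- def findDiagonalOrder0(nums: List[List[int]]) -> List[int]:
--     nd = len(nums) + max(len(row) for row in nums) - 1
--     buckets = [[] for _ in range(nd)]
--     for i, row in enumerate(nums):
--         for j, v in enumerate(row):
--             buckets[i + j].append(v)
--     return [v for b in buckets for v in reversed(b)]
-- ===== Notes on version B (the rewrite author's own statement) =====
-- stated objective: faster
-- what changed: replaced the per-diagonal rescanning walks (one while-loop per diagonal, each stepping through up to m rows) by a single pass that buckets every element under its diagonal index i+j and then concatenates the reversed buckets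
-- outside the precondition, e.g. on findDiagonalOrder0([]): A raises ValueError, B raises ValueError
import Mathlib
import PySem

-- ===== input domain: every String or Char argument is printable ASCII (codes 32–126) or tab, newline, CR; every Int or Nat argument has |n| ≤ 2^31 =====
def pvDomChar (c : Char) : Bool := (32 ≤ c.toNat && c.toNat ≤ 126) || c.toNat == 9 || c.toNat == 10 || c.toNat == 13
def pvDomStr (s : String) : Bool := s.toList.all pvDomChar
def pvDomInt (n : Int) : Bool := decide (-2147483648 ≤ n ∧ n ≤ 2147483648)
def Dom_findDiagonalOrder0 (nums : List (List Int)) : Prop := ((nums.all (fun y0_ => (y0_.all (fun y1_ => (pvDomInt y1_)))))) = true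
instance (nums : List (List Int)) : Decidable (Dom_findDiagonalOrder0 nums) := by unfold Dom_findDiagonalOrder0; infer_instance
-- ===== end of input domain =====

-- B replaces A's per-diagonal rescanning walks by a single pass that buckets each
-- element under its diagonal index i+j and concatenates the reversed buckets (objective: faster).

-- ===== PORT A =====
-- one step of A's inner while body: append nums[x][y] when y < len(nums[x])
def pvCellA (nums : List (List Int)) (x y : Nat) : List Int :=
  let row := nums.getD x []
  if y < row.length then [row.getD y 0] else []

-- A's 'while x >= 0' loop started at (x, y): x counts down, y counts up
def pvWhileA (nums : List (List Int)) : Nat → Nat → List Int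
  | 0, y => pvCellA nums 0 y
  | x+1, y => pvCellA nums (x+1) y ++ pvWhileA nums x (y+1)

def findDiagonalOrder0 (nums : List (List Int)) : List Int :=
  let m := nums.length
  -- n = max(len(row) for row in nums); Python raises ValueError on nums = [] (excluded by Pre_)
  let n := (nums.map List.length).foldl Nat.max 0
  let res := (List.range m).foldl (fun res i => res ++ pvWhileA nums i 0) []
  (List.range' 1 (n - 1)).foldl (fun res i => res ++ pvWhileA nums (m - 1) i) res

-- ===== PORT B =====
-- inner loop of B: for j, v in enumerate(row): buckets[i + j].append(v)
def pvFillRow (i : Nat) (row : List Int) (buckets : List (List Int)) : List (List Int) :=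
  row.zipIdx.foldl (fun b vj => b.modify (i + vj.2) (fun l => l ++ [vj.1])) buckets

def findDiagonalOrder0_alt (nums : List (List Int)) : List Int :=
  let nd := nums.length + (nums.map List.length).foldl Nat.max 0 - 1
  let buckets := nums.zipIdx.foldl (fun b ri => pvFillRow ri.2 ri.1 b) (List.replicate nd [])
  buckets.foldl (fun res b => res ++ b.reverse) []

-- ===== PRECONDITION & SPEC =====
-- Pre_ excludes only nums = [], on which A's max() (and B's) raises ValueError.
def Pre_findDiagonalOrder0 (nums : List (List Int)) : Prop := nums ≠ []
instance (nums : List (List Int)) : Decidable (Pre_findDiagonalOrder0 nums) := by unfold Pre_findDiagonalOrder0; infer_instance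
def pvWitness_findDiagonalOrder0 : List (List Int) := [[1, 2, 3], [4], [], [5, 6]]

def Spec_findDiagonalOrder0 (nums : List (List Int)) (out : List Int) : Prop := out = findDiagonalOrder0_alt nums
instance (nums : List (List Int)) (out : List Int) : Decidable (Spec_findDiagonalOrder0 nums out) := by unfold Spec_findDiagonalOrder0; infer_instance

-- ===== CLAIM (what is proved, stated in full; the proofs are below) =====
def Claim_equal_findDiagonalOrder0 : Prop := ∀ (nums : List (List Int)), Dom_findDiagonalOrder0 nums → Pre_findDiagonalOrder0 nums → Spec_findDiagonalOrder0 nums (findDiagonalOrder0 nums)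

-- ===== LEMMAS AND PROOFS =====

-- the element of diagonal d contributed by row x, if any
def pvCell? (nums : List (List Int)) (x d : Nat) : Option Int :=
  if x ≤ d ∧ d - x < (nums.getD x []).length then some ((nums.getD x []).getD (d - x) 0) else none

-- diagonal d in increasing row order
def pvAsc (nums : List (List Int)) (d : Nat) : List Int :=
  (List.range nums.length).filterMap (fun x => pvCell? nums x d)

-- inner fill loop of B with an explicit enumerate offset j
def pvFillAux (i : Nat) (row : List Int) (j : Nat) (b : List (List Int)) : List (List Int) :=
  (row.zipIdx j).foldl (fun b vj => b.modify (i + vj.2) (fun l => l ++ [vj.1])) b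

theorem pv_cellA_eq (nums : List (List Int)) (x y : Nat) :
    pvCellA nums x y = (pvCell? nums x (x + y)).toList := by
  have h1 : x ≤ x + y := by omega
  have h2 : x + y - x = y := by omega
  simp only [pvCellA, pvCell?, h1, h2, true_and]
  split <;> simp

theorem pv_whileA_eq (nums : List (List Int)) (x y : Nat) :
    pvWhileA nums x y = ((List.range (x+1)).reverse).filterMap (fun t => pvCell? nums t (x + y)) := by
  induction x generalizing y with
  | zero =>
    simp [pvWhileA, pv_cellA_eq, List.range_succ, List.filterMap_cons]
    cases pvCell? nums 0 y <;> simp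
  | succ x ih =>
    rw [pvWhileA, ih (y+1), pv_cellA_eq]
    have harith : x + (y + 1) = x + 1 + y := by omega
    rw [harith]
    rw [show List.range (x+1+1) = List.range (x+1) ++ [x+1] from List.range_succ]
    rw [List.reverse_append, List.filterMap_append]
    simp [List.filterMap_cons]
    cases pvCell? nums (x+1) (x+1+y) <;> simp

theorem pv_le_foldl_max (l : List Nat) (a : Nat) : ∀ x ∈ l, x ≤ l.foldl Nat.max a := by
  induction l generalizing a with
  | nil => simp
  | cons h t ih =>
    intro x hx
    have hinit : ∀ (b : List Nat) (c : Nat), c ≤ b.foldl Nat.max c := by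
      intro b
      induction b with
      | nil => simp
      | cons hb tb ihb => intro c; exact le_trans (Nat.le_max_left c hb) (ihb _)
    simp only [List.mem_cons] at hx
    rcases hx with rfl | hx
    · simpa [List.foldl_cons] using le_trans (Nat.le_max_right a x) (hinit t _)
    · simpa [List.foldl_cons] using ih _ x hx

theorem pv_getD_modify (b : List (List Int)) (t d : Nat) (f : List Int → List Int)
    (ht : t < b.length) :
    (b.modify t f).getD d [] = if t = d then f (b.getD d []) else b.getD d [] := by
  by_cases hd : d < b.length
  · have hd' : d < (b.modify t f).length := by simpa [List.length_modify] using hd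
    rw [List.getD_eq_getElem _ _ hd', List.getElem_modify]
    split <;> simp_all
  · have : b.length ≤ d := by omega
    rw [List.getD_eq_default _ _ (by simpa [List.length_modify] using this),
        List.getD_eq_default _ _ this]
    have : t ≠ d := by omega
    simp [this]

theorem pv_length_fillAux (i : Nat) (row : List Int) (j : Nat) (b : List (List Int)) :
    (pvFillAux i row j b).length = b.length := by
  induction row generalizing j b with
  | nil => simp [pvFillAux]
  | cons v t ih =>
    simp only [pvFillAux, List.zipIdx_cons, List.foldl_cons]
    rw [show ∀ b', (t.zipIdx (j+1)).foldl (fun b vj => b.modify (i + vj.2) (fun l => l ++ [vj.1])) b' = pvFillAux i t (j+1) b' from fun _ => rfl]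
    rw [ih, List.length_modify]

theorem pv_getD_fillAux (i : Nat) (row : List Int) (j : Nat) (b : List (List Int))
    (hb : i + j + row.length ≤ b.length) (d : Nat) :
    (pvFillAux i row j b).getD d [] =
      b.getD d [] ++ (if i + j ≤ d ∧ d < i + j + row.length then [row.getD (d - (i + j)) 0] else []) := by
  induction row generalizing j b with
  | nil => simp [pvFillAux]
  | cons v t ih =>
    simp only [pvFillAux, List.zipIdx_cons, List.foldl_cons]
    rw [show ∀ b', (t.zipIdx (j+1)).foldl (fun b vj => b.modify (i + vj.2) (fun l => l ++ [vj.1])) b' = pvFillAux i t (j+1) b' from fun _ => rfl]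
    have hlen : i + (j+1) + t.length ≤ (b.modify (i+j) (fun l => l ++ [v])).length := by
      rw [List.length_modify]; simp at hb; omega
    rw [ih (j+1) _ hlen]
    rw [pv_getD_modify _ _ _ _ (by simp at hb; omega)]
    by_cases hd : i + j = d
    · subst hd
      have h2 : i + j ≤ i + j ∧ i + j < i + j + (v :: t).length := by simp
      simp only [if_neg (by omega : ¬ (i + (j+1) ≤ i + j ∧ i + j < i + (j+1) + t.length)), if_pos h2]
      simp
    · rw [if_neg hd]
      by_cases hc : i + j ≤ d ∧ d < i + j + (v :: t).length
      · have hc' : i + (j+1) ≤ d ∧ d < i + (j+1) + t.length := by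
          simp at hc ⊢; omega
        rw [if_pos hc', if_pos hc]
        have : d - (i + j) = (d - (i + (j+1))) + 1 := by omega
        rw [this, List.getD_cons_succ]
      · have hc' : ¬ (i + (j+1) ≤ d ∧ d < i + (j+1) + t.length) := by
          simp at hc ⊢; omega
        rw [if_neg hc', if_neg hc]

theorem pv_fillRow_eq_aux (i : Nat) (row : List Int) (b : List (List Int)) :
    pvFillRow i row b = pvFillAux i row 0 b := rfl

theorem pv_length_outer (rows : List (List Int)) (k : Nat) (b : List (List Int)) :
    ((rows.zipIdx k).foldl (fun b ri => pvFillRow ri.2 ri.1 b) b).length = b.length := by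
  induction rows generalizing k b with
  | nil => simp
  | cons r t ih =>
    simp only [List.zipIdx_cons, List.foldl_cons]
    rw [ih, pv_fillRow_eq_aux, pv_length_fillAux]

theorem pv_getD_outer (rows : List (List Int)) (k : Nat) (b : List (List Int))
    (hb : ∀ t r, rows[t]? = some r → k + t + r.length ≤ b.length) (d : Nat) :
    ((rows.zipIdx k).foldl (fun b ri => pvFillRow ri.2 ri.1 b) b).getD d [] =
      b.getD d [] ++ (rows.zipIdx k).filterMap
        (fun ri => if ri.2 ≤ d ∧ d - ri.2 < ri.1.length then some (ri.1.getD (d - ri.2) 0) else none) := by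
  induction rows generalizing k b with
  | nil => simp
  | cons r t ih =>
    simp only [List.zipIdx_cons, List.foldl_cons, List.filterMap_cons]
    have hb0 : k + 0 + r.length ≤ b.length := hb 0 r (by simp)
    have hb' : ∀ s q, t[s]? = some q → (k+1) + s + q.length ≤ (pvFillRow k r b).length := by
      intro s q hq
      have := hb (s+1) q (by simpa using hq)
      rw [pv_fillRow_eq_aux, pv_length_fillAux]
      omega
    rw [ih (k+1) _ hb']
    rw [pv_fillRow_eq_aux, pv_getD_fillAux k r 0 b (by simpa using hb0) d]
    have hcond : (k + 0 ≤ d ∧ d < k + 0 + r.length) ↔ (k ≤ d ∧ d - k < r.length) := by omega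
    by_cases hc : k ≤ d ∧ d - k < r.length
    · rw [if_pos (hcond.mpr hc), if_pos hc]
      simp [List.append_assoc]
    · rw [if_neg (fun h => hc (hcond.mp h)), if_neg hc]
      simp

theorem pv_zipIdx_filterMap (l : List (List Int)) (k : Nat) (g : Nat → List Int → Option Int) :
    (l.zipIdx k).filterMap (fun ri => g ri.2 ri.1) =
      (List.range' k l.length).filterMap (fun x => g x (l.getD (x - k) [])) := by
  induction l generalizing k with
  | nil => simp
  | cons r t ih =>
    simp only [List.zipIdx_cons, List.filterMap_cons, List.length_cons, List.range'_succ]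
    rw [ih (k+1)]
    have htail : (List.range' (k+1) t.length).filterMap (fun x => g x (t.getD (x - (k+1)) [])) =
        (List.range' (k+1) t.length).filterMap (fun x => g x ((r :: t).getD (x - k) [])) := by
      apply List.filterMap_congr
      intro x hx
      have hxk : k + 1 ≤ x := (List.mem_range'_1.mp hx).1
      have : x - k = (x - (k+1)) + 1 := by omega
      rw [this, List.getD_cons_succ]
    rw [htail]
    simp

theorem pv_asc_reverse (nums : List (List Int)) (d : Nat) :
    (pvAsc nums d).reverse = ((List.range nums.length).reverse).filterMap (fun x => pvCell? nums x d) := by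
  rw [pvAsc, List.filterMap_reverse]

theorem pv_whileA_diag (nums : List (List Int)) (i : Nat) (hi : i < nums.length) :
    pvWhileA nums i 0 = (pvAsc nums i).reverse := by
  rw [pv_whileA_eq, pv_asc_reverse]
  have hsplit : List.range nums.length = List.range (i+1) ++ List.range' (i+1) (nums.length - (i+1)) := by
    have h := @List.range'_append 0 (i+1) (nums.length - (i+1)) 1
    have h2 : (i+1) + (nums.length - (i+1)) = nums.length := by omega
    rw [h2] at h
    rw [List.range_eq_range', List.range_eq_range', ← h]
    norm_num
  rw [hsplit, List.reverse_append, List.filterMap_append]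
  have hnil : (List.range' (i+1) (nums.length - (i+1))).reverse.filterMap (fun x => pvCell? nums x i) = [] := by
    rw [List.filterMap_eq_nil_iff]
    intro x hx
    rw [List.mem_reverse, List.mem_range'_1] at hx
    rw [pvCell?, if_neg (by omega)]
  rw [hnil, List.nil_append]
  norm_num

theorem pv_whileA_diag2 (nums : List (List Int)) (i : Nat) (hm : nums ≠ []) :
    pvWhileA nums (nums.length - 1) i = (pvAsc nums (nums.length - 1 + i)).reverse := by
  have hlen : nums.length - 1 + 1 = nums.length := by
    cases nums with
    | nil => exact absurd rfl hm
    | cons a t => simp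
  rw [pv_whileA_eq, pv_asc_reverse, hlen]

theorem pv_A_flat (nums : List (List Int)) (hm : nums ≠ []) :
    findDiagonalOrder0 nums =
      (List.range nums.length).flatMap (fun d => (pvAsc nums d).reverse) ++
      (List.range' nums.length ((nums.map List.length).foldl Nat.max 0 - 1)).flatMap
        (fun d => (pvAsc nums d).reverse) := by
  show ((List.range' 1 ((nums.map List.length).foldl Nat.max 0 - 1)).foldl
      (fun res i => res ++ pvWhileA nums (nums.length - 1) i)
      ((List.range nums.length).foldl (fun res i => res ++ pvWhileA nums i 0) [])) = _
  rw [PySem.List.foldl_append_eq_flatMap, PySem.List.foldl_append_eq_flatMap]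
  rw [List.nil_append]
  congr 1
  · apply List.flatMap_congr
    intro x hx
    exact pv_whileA_diag nums x (List.mem_range.mp hx)
  · have h1 : (List.range' 1 ((nums.map List.length).foldl Nat.max 0 - 1)).flatMap
        (fun i => pvWhileA nums (nums.length - 1) i) =
        (List.range' 1 ((nums.map List.length).foldl Nat.max 0 - 1)).flatMap
        (fun i => (pvAsc nums (nums.length - 1 + i)).reverse) := by
      apply List.flatMap_congr
      intro x _
      exact pv_whileA_diag2 nums x hm
    rw [h1]
    have h2 : List.range' nums.length ((nums.map List.length).foldl Nat.max 0 - 1) =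
        (List.range' 1 ((nums.map List.length).foldl Nat.max 0 - 1)).map (fun x => nums.length - 1 + x) := by
      rw [List.map_add_range']
      congr 1
      cases nums with
      | nil => exact absurd rfl hm
      | cons a t => simp
    rw [h2, List.flatMap_map]

theorem pv_B_flat (nums : List (List Int)) (hm : nums ≠ []) :
    findDiagonalOrder0_alt nums =
      (List.range (nums.length + (nums.map List.length).foldl Nat.max 0 - 1)).flatMap
        (fun d => (pvAsc nums d).reverse) := by
  have hm1 : 1 ≤ nums.length := by
    cases nums with
    | nil => exact absurd rfl hm
    | cons a t => simp
  set n := (nums.map List.length).foldl Nat.max 0 with hn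
  set nd := nums.length + n - 1 with hnd
  set buckets := nums.zipIdx.foldl (fun b ri => pvFillRow ri.2 ri.1 b) (List.replicate nd ([] : List Int)) with hbuck
  show buckets.foldl (fun res b => res ++ b.reverse) [] = _
  have hrepl : ∀ d, (List.replicate nd ([] : List Int)).getD d [] = [] := by
    intro d
    by_cases hd : d < nd
    · rw [List.getD_eq_getElem _ _ (by simpa using hd), List.getElem_replicate]
    · exact List.getD_eq_default _ _ (by simpa using Nat.le_of_not_lt hd)
  have hbound : ∀ t r, nums[t]? = some r → 0 + t + r.length ≤ (List.replicate nd ([] : List Int)).length := by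
    intro t r hr
    have ht : t < nums.length := by
      by_contra h
      rw [List.getElem?_eq_none (by omega)] at hr
      simp at hr
    have hrmem : r ∈ nums := List.mem_of_getElem? hr
    have hrn : r.length ≤ n := pv_le_foldl_max _ 0 r.length (List.mem_map_of_mem hrmem)
    simp only [List.length_replicate]
    omega
  have hget : ∀ d, buckets.getD d [] = pvAsc nums d := by
    intro d
    rw [hbuck]
    rw [show nums.zipIdx = nums.zipIdx 0 from rfl]
    rw [pv_getD_outer nums 0 _ hbound d, hrepl d, List.nil_append]
    rw [pv_zipIdx_filterMap nums 0 (fun x r => if x ≤ d ∧ d - x < r.length then some (r.getD (d - x) 0) else none)]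
    rw [pvAsc, List.range_eq_range']
    apply List.filterMap_congr
    intro x _
    simp [pvCell?]
  have hlen : buckets.length = nd := by
    rw [hbuck, show nums.zipIdx = nums.zipIdx 0 from rfl, pv_length_outer, List.length_replicate]
  have hbuckets : buckets = (List.range nd).map (fun d => pvAsc nums d) := by
    apply List.ext_getElem
    · simp [hlen]
    · intro i h1 h2
      have hi : i < nd := by simpa [hlen] using h1
      rw [← List.getD_eq_getElem _ ([] : List Int) h1, hget i]
      simp
  rw [hbuckets, PySem.List.foldl_append_eq_flatMap, List.nil_append, List.flatMap_map]

theorem pv_final (nums : List (List Int)) (hm : nums ≠ []) :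
    findDiagonalOrder0 nums = findDiagonalOrder0_alt nums := by
  rw [pv_A_flat nums hm, pv_B_flat nums hm]
  set n := (nums.map List.length).foldl Nat.max 0 with hn
  rcases Nat.eq_zero_or_pos n with hn0 | hn0
  · have hac : ∀ d, pvAsc nums d = [] := by
      intro d
      rw [pvAsc, List.filterMap_eq_nil_iff]
      intro x _
      have hlen0 : (nums.getD x []).length = 0 := by
        by_cases hx : x < nums.length
        · have hmem : nums.getD x [] ∈ nums := by
            rw [List.getD_eq_getElem _ _ hx]
            exact List.getElem_mem hx
          have := pv_le_foldl_max (nums.map List.length) 0 (nums.getD x []).length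
            (List.mem_map_of_mem hmem)
          omega
        · rw [List.getD_eq_default _ _ (by omega)]
          rfl
      rw [pvCell?, if_neg]
      rintro ⟨h1, h2⟩
      omega
    have hz : ∀ l : List Nat, l.flatMap (fun d => (pvAsc nums d).reverse) = [] := by
      intro l
      rw [List.flatMap_eq_nil_iff]
      intro x _
      rw [hac]
      rfl
    rw [hz, hz, hz]
    rfl
  · have h2 : nums.length + n - 1 = nums.length + (n - 1) := by omega
    rw [h2, List.range_eq_range', List.range_eq_range']
    have h := @List.range'_append 0 nums.length (n-1) 1
    norm_num at h
    rw [← h, List.flatMap_append]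

-- ===== VERDICT (by name: the statement is the Claim_ definition above) =====
theorem findDiagonalOrder0_spec : Claim_equal_findDiagonalOrder0 := by
  intro nums _ hpre
  unfold Spec_findDiagonalOrder0
  exact pv_final nums hpre
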